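-- pv_equiv track=rewrite | github.com/dwildmann/BLELumatrix | Peripheral/Peripheral.py | parse_entries
-- ===== SOURCE A (Python) =====
-- def parse_entries(data):
--     # parse 4-byte entries idx,r,g,b -> list of (idx,(r,g,b))
--     if not data:
--         return []
--     entries = []
--     if len(data) % 4 != 0:
--         length = len(data) - (len(data) % 4)
--     else:
--         length = len(data)
--     for i in range(0, length, 4):
--         idx = data[i]
--         r = data[i + 1]
--         g = data[i + 2]
--         b = data[i + 3]
--         entries.append((idx, (r, g, b)))
--     return entries
-- ===== SOURCE B (Python) =====
-- def parse_entries(data):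
--     # Columnar decomposition: project the four strided columns with extended
--     # slices, then zip the columns back into rows. zip truncates at the
--     # shortest column, which drops any trailing partial entry.
--     idxs, rs, gs, bs = data[0::4], data[1::4], data[2::4], data[3::4]
--     return [(i, (r, g, b)) for i, r, g, b in zip(idxs, rs, gs, bs)]
-- ===== Notes on version B (the rewrite author's own statement) =====
-- stated objective: alternative
-- what changed: Replaces A's single row-wise index loop (length rounding, range(0,length,4), four indexed reads per iteration) by a columnar decomposition: four strided slice passes project the idx/r/g/b columns, then one zip pass recombines them into rows, with zip's shortest-column truncation replacing the explicit len%4 arithmetic.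
import Mathlib
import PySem

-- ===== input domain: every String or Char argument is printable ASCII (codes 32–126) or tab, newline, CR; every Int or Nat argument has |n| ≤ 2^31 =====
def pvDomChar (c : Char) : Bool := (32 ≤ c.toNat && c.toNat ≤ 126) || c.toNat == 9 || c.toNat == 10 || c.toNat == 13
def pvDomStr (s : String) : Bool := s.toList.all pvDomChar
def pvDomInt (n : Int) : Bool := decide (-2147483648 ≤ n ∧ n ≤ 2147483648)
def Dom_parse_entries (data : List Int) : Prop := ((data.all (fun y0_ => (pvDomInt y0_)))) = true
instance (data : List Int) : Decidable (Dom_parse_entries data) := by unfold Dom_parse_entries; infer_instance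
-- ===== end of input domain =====

-- B replaces A's row-wise index loop by a columnar decomposition: four strided-slice passes
-- project the idx/r/g/b columns, one zip pass recombines them into rows (alternative structure, same values).

-- ===== PORT A =====
-- A: truncate the length to a multiple of 4, then loop i over range(0, length, 4) appending (data[i], (data[i+1], data[i+2], data[i+3])).
def parse_entries (data : List Int) : List (Int × (Int × Int × Int)) :=
  if data = [] then []
  else
    let n : Int := PySem.List.len data
    let length : Int := if PySem.Int.mod n 4 ≠ 0 then n - PySem.Int.mod n 4 else n
    (PySem.List.pyRange 0 length 4).foldl
      (fun entries i =>
        entries ++ [(PySem.List.pyGetD data i 0,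
          (PySem.List.pyGetD data (i + 1) 0,
           PySem.List.pyGetD data (i + 2) 0,
           PySem.List.pyGetD data (i + 3) 0))]) []

-- ===== PORT B =====
-- B's zip(idxs, rs, gs, bs) + tuple comprehension: structural recursion on the four lists,
-- stopping at the shortest list (exactly Python zip's truncation).
def pvZip4 : List Int → List Int → List Int → List Int → List (Int × (Int × Int × Int))
  | i :: is, r :: rs, g :: gs, b :: bs => (i, (r, g, b)) :: pvZip4 is rs gs bs
  | _, _, _, _ => []

-- B: the four extended slices data[k::4] (PySem.List.slice?; step 4 ≠ 0, so always some), then zip.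
def parse_entries_alt (data : List Int) : List (Int × (Int × Int × Int)) :=
  let idxs := (PySem.List.slice? data (some 0) none 4).getD []
  let rs := (PySem.List.slice? data (some 1) none 4).getD []
  let gs := (PySem.List.slice? data (some 2) none 4).getD []
  let bs := (PySem.List.slice? data (some 3) none 4).getD []
  pvZip4 idxs rs gs bs

-- ===== PRECONDITION & SPEC =====
def Spec_parse_entries (data : List Int) (out : List (Int × (Int × Int × Int))) : Prop := out = parse_entries_alt data
instance (data : List Int) (out : List (Int × (Int × Int × Int))) : Decidable (Spec_parse_entries data out) := by unfold Spec_parse_entries; infer_instance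

-- ===== CLAIM (what is proved, stated in full; the proofs are below) =====
def Claim_equal_parse_entries : Prop := ∀ (data : List Int), Dom_parse_entries data → Spec_parse_entries data (parse_entries data)

-- ===== LEMMAS AND PROOFS =====

-- common characterisation: the j-th entry reads data at 4j, 4j+1, 4j+2, 4j+3
def pvChunkSpec (data : List Int) : List (Int × (Int × Int × Int)) :=
  (List.range (data.length / 4)).map (fun j =>
    (data.getD (4 * j) 0, (data.getD (4 * j + 1) 0, data.getD (4 * j + 2) 0, data.getD (4 * j + 3) 0)))

theorem pvFilterMap_eq_map {α β : Type} (g : α → Option β) (h : α → β) (l : List α)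
    (H : ∀ a ∈ l, g a = some (h a)) : l.filterMap g = l.map h := by
  induction l with
  | nil => rfl
  | cons x xs ih =>
      simp only [List.filterMap_cons, H x (by simp), List.map_cons]
      rw [ih (fun a ha => H a (by simp [ha]))]

-- the strided column slice data[k::4] is a map over range ⌈(len−k)/4⌉
theorem pvCol_eq (k : Nat) (xs : List Int) :
    (PySem.List.slice? xs (some (k : Int)) none 4).getD []
      = (List.range (if k < xs.length then (xs.length - k + 3) / 4 else 0)).map
          (fun j => xs.getD (k + 4 * j) 0) := by
  simp only [PySem.List.slice?, PySem.List.sliceIndices]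
  norm_num
  have hk0 : ¬((k : Int) < 0) := by omega
  simp only [if_neg hk0]
  by_cases hkn : k < xs.length
  · have hmin : min (k : Int) (xs.length : Int) = (k : Int) := by omega
    have hcond : ((k : Int)) < (xs.length : Int) := by exact_mod_cast hkn
    rw [hmin, if_pos hcond, if_pos hkn]
    have hcount : (((xs.length : Int) - (k : Int) + 4 - 1) / 4).toNat = (xs.length - k + 3) / 4 := by
      omega
    rw [hcount]
    apply pvFilterMap_eq_map
    intro j hj
    simp only [List.mem_range] at hj
    have hlt : k + 4 * j < xs.length := by omega
    have hidx : ((k : Int) + 4 * (j : Int)).toNat = k + 4 * j := by omega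
    rw [hidx, List.getElem?_eq_getElem hlt]
    simp
  · have hmin : min (k : Int) (xs.length : Int) = (xs.length : Int) := by omega
    have hcond : ¬(((xs.length : Int)) < (xs.length : Int)) := by omega
    rw [hmin, if_neg hcond, if_neg hkn]
    simp

theorem pvZip4_eq (as bs cs ds : List Int) :
    pvZip4 as bs cs ds
      = (List.range (min (min as.length bs.length) (min cs.length ds.length))).map
          (fun j => (as.getD j 0, (bs.getD j 0, cs.getD j 0, ds.getD j 0))) := by
  induction as generalizing bs cs ds with
  | nil => cases bs <;> cases cs <;> cases ds <;> simp [pvZip4]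
  | cons a as ih =>
      cases bs with
      | nil => cases cs <;> cases ds <;> simp [pvZip4]
      | cons b bs =>
        cases cs with
        | nil => cases ds <;> simp [pvZip4]
        | cons c cs =>
          cases ds with
          | nil => simp [pvZip4]
          | cons d ds =>
            rw [pvZip4, ih]
            have hm : min (min (a :: as).length (b :: bs).length)
                (min (c :: cs).length (d :: ds).length)
                = (min (min as.length bs.length) (min cs.length ds.length)) + 1 := by
              simp
            rw [hm, List.range_succ_eq_map, List.map_cons, List.map_map]
            simp [Function.comp]

theorem pvGetD_map_range (f : Nat → Int) (m j : Nat) (hj : j < m) :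
    (((List.range m).map f).getD j 0) = f j := by
  rw [List.getD_eq_getElem _ _ (by simpa using hj)]
  simp

theorem parse_entries_alt_eq_spec (data : List Int) :
    parse_entries_alt data = pvChunkSpec data := by
  unfold parse_entries_alt
  have h0 := pvCol_eq 0 data
  have h1 := pvCol_eq 1 data
  have h2 := pvCol_eq 2 data
  have h3 := pvCol_eq 3 data
  norm_num at h0 h1 h2 h3
  rw [h0, h1, h2, h3, pvZip4_eq]
  simp only [List.length_map, List.length_range]
  rw [show (min (min (if 0 < data.length then (data.length + 3) / 4 else 0)
        (if 1 < data.length then (data.length - 1 + 3) / 4 else 0))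
      (min (if 2 < data.length then (data.length - 2 + 3) / 4 else 0)
        (if 3 < data.length then (data.length - 3 + 3) / 4 else 0)))
      = data.length / 4 from by split_ifs <;> omega]
  unfold pvChunkSpec
  apply List.map_congr_left
  intro j hj
  simp only [List.mem_range] at hj
  rw [pvGetD_map_range _ _ j (by split_ifs <;> omega),
      pvGetD_map_range _ _ j (by split_ifs <;> omega),
      pvGetD_map_range _ _ j (by split_ifs <;> omega),
      pvGetD_map_range _ _ j (by split_ifs <;> omega)]
  simp [List.getD, Nat.add_comm]

theorem parse_entries_eq_spec (data : List Int) : parse_entries data = pvChunkSpec data := by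
  unfold parse_entries pvChunkSpec
  by_cases h : data = []
  · subst h; simp
  · simp only [if_neg h, PySem.List.len_eq]
    have hmod : PySem.Int.mod ((data.length : Int)) 4 = ((data.length % 4 : Nat) : Int) := by
      exact_mod_cast PySem.Int.mod_natCast data.length 4
    rw [hmod]
    have hc : (if ((data.length % 4 : Nat) : Int) ≠ 0
        then ((data.length : Int)) - ((data.length % 4 : Nat) : Int)
        else ((data.length : Int))) = ((4 * (data.length / 4) : Nat) : Int) := by
      split_ifs with h4 <;> push_cast at * <;> omega
    rw [hc, PySem.List.pyRange_of_pos 0 _ (by norm_num : (0:Int) < 4),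
        PySem.List.foldl_append_singleton_eq_map]
    have hcount : (if (0:Int) < ((4 * (data.length / 4) : Nat) : Int)
        then ((((4 * (data.length / 4) : Nat) : Int) - 0 + 4 - 1) / 4).toNat else 0)
        = data.length / 4 := by
      split_ifs with h0 <;> omega
    rw [hcount, List.map_map, List.nil_append]
    apply List.map_congr_left
    intro j hj
    have e0 : (0:Int) + 4 * (j : Int) = ((4 * j : Nat) : Int) := by push_cast; ring
    have e1 : ((4 * j : Nat) : Int) + 1 = ((4 * j + 1 : Nat) : Int) := by push_cast; ring
    have e2 : ((4 * j : Nat) : Int) + 2 = ((4 * j + 2 : Nat) : Int) := by push_cast; ring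
    have e3 : ((4 * j : Nat) : Int) + 3 = ((4 * j + 3 : Nat) : Int) := by push_cast; ring
    simp only [Function.comp, e0, e1, e2, e3, PySem.List.pyGetD_natCast]

-- ===== VERDICT (by name: the statement is the Claim_ definition above) =====
theorem parse_entries_spec : Claim_equal_parse_entries := by
  intro data _
  unfold Spec_parse_entries
  rw [parse_entries_eq_spec, parse_entries_alt_eq_spec]
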